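-- pv_equiv track=rewrite | github.com/raeez/chiral-bar-cobar | compute/lib/bicoloured_partition_engine.py | bicoloured_from_product
-- ===== SOURCE A (Python) =====
-- from typing import List, Tuple
--
-- def bicoloured_from_product(nmax: int) -> List[int]:
--     r"""Compute bicoloured partition numbers via direct product expansion.
--
--     Expands prod_{n=1}^{N} 1/(1-q^n)^2 as a power series up to q^{nmax}.
--
--     This is an independent method from the convolution, providing cross-check.
--
--     # VERIFIED:
--     # [DC] Direct product expansion of generating function
--     # [LT] OEIS A000712
--     """
--     # Start with coefficient array [1, 0, 0, ..., 0]
--     coeffs = [0] * (nmax + 1)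
--     coeffs[0] = 1
--
--     # Multiply by 1/(1-q^k)^2 = sum_{m >= 0} (m+1) * q^{k*m}
--     # for k = 1, 2, ..., nmax
--     for k in range(1, nmax + 1):
--         # Multiply current polynomial by 1/(1-q^k)^2
--         # 1/(1-x)^2 = sum_{m>=0} (m+1) x^m, so 1/(1-q^k)^2 = sum (m+1) q^{km}
--         # Equivalent to applying 1/(1-q^k) twice
--         # First application of 1/(1-q^k): coeffs[j] += coeffs[j-k]
--         for j in range(k, nmax + 1):
--             coeffs[j] += coeffs[j - k]
--         # Second application of 1/(1-q^k): coeffs[j] += coeffs[j-k]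
--         for j in range(k, nmax + 1):
--             coeffs[j] += coeffs[j - k]
--
--     return coeffs
-- ===== SOURCE B (Python) =====
-- from typing import List
--
-- def bicoloured_from_product(nmax: int) -> List[int]:
--     # One-colour partition numbers by a single geometric-series pass per k,
--     # then self-convolution: A000712(q) = P(q)^2.
--     p = [1] + [0] * nmax
--     for k in range(1, nmax + 1):
--         for j in range(k, nmax + 1):
--             p[j] += p[j - k]
--     return [sum(p[i] * p[n - i] for i in range(n + 1)) for n in range(nmax + 1)]
-- ===== Notes on version B (the rewrite author's own statement) =====
-- stated objective: alternative
-- what changed: B builds the one-colour partition series P(q)=prod 1/(1-q^k) with a single geometric-series pass per k and obtains A000712 as the self-convolution P(q)^2, instead of applying each factor 1/(1-q^k) twice in place as A does.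
-- crash fix: For negative nmax A raises IndexError (it assigns into an empty coefficient list) while B returns the empty list. — e.g. on bicoloured_from_product(-1): A raises IndexError, B returns []
import Mathlib
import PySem

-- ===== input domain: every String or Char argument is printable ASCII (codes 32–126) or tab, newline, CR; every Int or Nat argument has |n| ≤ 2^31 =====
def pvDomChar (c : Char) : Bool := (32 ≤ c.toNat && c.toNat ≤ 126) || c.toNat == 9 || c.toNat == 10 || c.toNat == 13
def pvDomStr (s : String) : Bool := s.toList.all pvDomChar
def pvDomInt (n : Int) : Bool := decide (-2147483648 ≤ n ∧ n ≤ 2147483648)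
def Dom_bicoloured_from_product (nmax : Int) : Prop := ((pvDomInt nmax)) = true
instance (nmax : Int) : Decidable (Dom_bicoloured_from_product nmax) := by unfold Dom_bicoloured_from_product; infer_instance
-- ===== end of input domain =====

-- B computes the one-colour partition series with a single geometric-series pass per k and then
-- squares it by self-convolution, instead of applying each factor 1/(1-q^k) twice in place (alternative decomposition, same cost).

-- ===== PORT A =====
-- shared inner loop: 'for j in range(k, nmax+1): c[j] += c[j-k]' (identical text in both sources)
def passk (nmax k : Int) (c : List Int) : List Int :=
  (PySem.List.pyRange k (nmax+1)).foldl (fun c j =>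
    c.set j.toNat (c.getD j.toNat 0 + c.getD (j-k).toNat 0)) c

-- A: coeffs = [0]*(nmax+1); coeffs[0] = 1; for k in 1..nmax apply the pass twice; return coeffs
def bicoloured_from_product (nmax : Int) : List Int :=
  let coeffs := (List.replicate (nmax+1).toNat (0:Int)).set 0 1
  (PySem.List.pyRange 1 (nmax+1)).foldl (fun c k => passk nmax k (passk nmax k c)) coeffs

-- ===== PORT B =====
-- B: p = [1]+[0]*nmax; for k in 1..nmax apply the pass once; return the self-convolution of p
def bicoloured_from_product_alt (nmax : Int) : List Int :=
  let p := (1 : Int) :: List.replicate nmax.toNat 0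
  let p := (PySem.List.pyRange 1 (nmax+1)).foldl (fun c k => passk nmax k c) p
  (PySem.List.pyRange 0 (nmax+1)).map (fun n =>
    (PySem.List.pyRange 0 (n+1)).foldl (fun s i =>
      s + p.getD i.toNat 0 * p.getD (n-i).toNat 0) 0)

-- ===== PRECONDITION & SPEC =====
-- Pre_ excludes exactly the negative nmax, where A raises IndexError (it assigns into an empty coefficient list).
def Pre_bicoloured_from_product (nmax : Int) : Prop := 0 ≤ nmax
instance (nmax : Int) : Decidable (Pre_bicoloured_from_product nmax) := by unfold Pre_bicoloured_from_product; infer_instance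
def pvWitness_bicoloured_from_product : Int := (5)

-- For negative nmax, A raises IndexError (it assigns into an empty coefficient list) while B returns the empty list.
def Raises_bicoloured_from_product (nmax : Int) : Prop := nmax < 0
instance (nmax : Int) : Decidable (Raises_bicoloured_from_product nmax) := by unfold Raises_bicoloured_from_product; infer_instance
def pvRaiseWitness_bicoloured_from_product : Int := (-1)
def pvRaiseWitnessOut_bicoloured_from_product : List Int := []

def Spec_bicoloured_from_product (nmax : Int) (out : List Int) : Prop := out = bicoloured_from_product_alt nmax
instance (nmax : Int) (out : List Int) : Decidable (Spec_bicoloured_from_product nmax out) := by unfold Spec_bicoloured_from_product; infer_instance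

-- ===== CLAIM (what is proved, stated in full; the proofs are below) =====
def Claim_equal_bicoloured_from_product : Prop := ∀ (nmax : Int), Dom_bicoloured_from_product nmax → Pre_bicoloured_from_product nmax → Spec_bicoloured_from_product nmax (bicoloured_from_product nmax)
def Claim_raises_bicoloured_from_product : Prop := (∀ (nmax : Int), Dom_bicoloured_from_product nmax → Raises_bicoloured_from_product nmax → ¬ Pre_bicoloured_from_product nmax) ∧ (Dom_bicoloured_from_product (pvRaiseWitness_bicoloured_from_product) ∧ Raises_bicoloured_from_product (pvRaiseWitness_bicoloured_from_product) ∧ bicoloured_from_product_alt (pvRaiseWitness_bicoloured_from_product) = pvRaiseWitnessOut_bicoloured_from_product)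

-- ===== LEMMAS AND PROOFS =====
-- geometric-series operator: (G k f) n = coeff n of f(q)/(1-q^k)
def G (k : Nat) (f : Nat → Int) (n : Nat) : Int :=
  f n + if h : 0 < k ∧ k ≤ n then G k f (n - k) else 0
termination_by n
decreasing_by omega

def d0 : Nat → Int := fun n => if n = 0 then 1 else 0

def cnv (f g : Nat → Int) (n : Nat) : Int := ∑ i ∈ Finset.range (n + 1), f i * g (n - i)

theorem G_of_lt {k n : Nat} (f : Nat → Int) (h : ¬ (0 < k ∧ k ≤ n)) : G k f n = f n := by
  rw [G]; simp [h]

theorem G_of_le {k n : Nat} (f : Nat → Int) (hk : 0 < k) (h : k ≤ n) :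
    G k f n = f n + G k f (n - k) := by
  rw [G]; simp [hk, h]

theorem G_congr {k n : Nat} {f g : Nat → Int} (h : ∀ m ≤ n, f m = g m) :
    G k f n = G k g n := by
  induction n using Nat.strong_induction_on with
  | _ n ih =>
    conv_lhs => rw [G]
    conv_rhs => rw [G]
    by_cases hc : 0 < k ∧ k ≤ n
    · rw [dif_pos hc, dif_pos hc, h n le_rfl, ih (n - k) (by omega) (fun m hm => h m (by omega))]
    · rw [dif_neg hc, dif_neg hc, h n le_rfl]

theorem cnv_comm (f g : Nat → Int) (n : Nat) : cnv f g n = cnv g f n := by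
  unfold cnv
  conv_rhs => rw [← Finset.sum_range_reflect]
  apply Finset.sum_congr rfl
  intro i hi
  simp only [Finset.mem_range] at hi
  have h1 : n + 1 - 1 - i = n - i := by omega
  have h2 : n - (n - i) = i := by omega
  rw [h1, h2, mul_comm]

theorem G_cnv {k : Nat} (hk : 0 < k) (f g : Nat → Int) (n : Nat) :
    G k (cnv f g) n = cnv (G k f) g n := by
  induction n using Nat.strong_induction_on with
  | _ n ih =>
    by_cases hc : k ≤ n
    · rw [G_of_le _ hk hc, ih (n - k) (by omega)]
      unfold cnv
      have hsplit : ∑ i ∈ Finset.range (n + 1), G k f i * g (n - i)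
          = (∑ i ∈ Finset.range (n + 1), f i * g (n - i))
            + ∑ i ∈ Finset.range (n + 1), (if 0 < k ∧ k ≤ i then G k f (i - k) else 0) * g (n - i) := by
        rw [← Finset.sum_add_distrib]
        apply Finset.sum_congr rfl
        intro i _
        rw [G]
        by_cases hi : 0 < k ∧ k ≤ i
        · rw [dif_pos hi, if_pos hi]; ring
        · rw [dif_neg hi, if_neg hi]; ring
      rw [hsplit]
      congr 1
      have hz : ∑ i ∈ Finset.range (n + 1), (if 0 < k ∧ k ≤ i then G k f (i - k) else 0) * g (n - i)
          = ∑ i ∈ Finset.Ico k (n + 1), G k f (i - k) * g (n - i) := by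
        rw [Finset.range_eq_Ico, ← Finset.sum_Ico_consecutive _ (Nat.zero_le k) (show k ≤ n + 1 by omega)]
        have h1 : ∑ i ∈ Finset.Ico 0 k, (if 0 < k ∧ k ≤ i then G k f (i - k) else 0) * g (n - i) = 0 := by
          apply Finset.sum_eq_zero
          intro i hi
          simp only [Finset.mem_Ico] at hi
          simp [show ¬ (0 < k ∧ k ≤ i) by omega]
        have h2 : ∑ i ∈ Finset.Ico k (n + 1), (if 0 < k ∧ k ≤ i then G k f (i - k) else 0) * g (n - i)
            = ∑ i ∈ Finset.Ico k (n + 1), G k f (i - k) * g (n - i) := by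
          apply Finset.sum_congr rfl
          intro i hi
          simp only [Finset.mem_Ico] at hi
          rw [if_pos ⟨hk, hi.1⟩]
        rw [h1, h2, zero_add]
      rw [hz, Finset.sum_Ico_eq_sum_range]
      have : n + 1 - k = n - k + 1 := by omega
      rw [this]
      apply Finset.sum_congr rfl
      intro i _
      congr 1 <;> congr 1 <;> omega
    · rw [G_of_lt _ (by omega)]
      unfold cnv
      apply Finset.sum_congr rfl
      intro i hi
      simp only [Finset.mem_range] at hi
      rw [G_of_lt _ (by omega)]

def P1 : Nat → Nat → Int
  | 0 => d0
  | K + 1 => G (K + 1) (P1 K)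

def A2 : Nat → Nat → Int
  | 0 => d0
  | K + 1 => G (K + 1) (G (K + 1) (A2 K))

theorem cnv_d0 (n : Nat) : cnv d0 d0 n = d0 n := by
  unfold cnv
  rw [Finset.sum_eq_single 0]
  · simp [d0]
  · intro i hi h0
    simp [d0, h0]
  · simp

theorem A2_eq_cnv (K : Nat) : ∀ n, A2 K n = cnv (P1 K) (P1 K) n := by
  induction K with
  | zero => intro n; simpa [A2, P1] using (cnv_d0 n).symm
  | succ K ih =>
    intro n
    have hk : 0 < K + 1 := by omega
    calc A2 (K + 1) n = G (K + 1) (G (K + 1) (cnv (P1 K) (P1 K))) n := by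
            unfold A2
            apply G_congr; intro m _; apply G_congr; intro m' _; exact ih m'
      _ = G (K + 1) (cnv (P1 K) (G (K + 1) (P1 K))) n := by
            apply G_congr; intro m _
            rw [G_cnv hk, cnv_comm]
      _ = cnv (G (K + 1) (P1 K)) (G (K + 1) (P1 K)) n := G_cnv hk _ _ n
      _ = cnv (P1 (K + 1)) (P1 (K + 1)) n := rfl

theorem pass_aux (k : Nat) (hk : 0 < k) (c : List Int) (m : Nat) (hkm : k ≤ m) :
    ((PySem.List.pyRange (k:Int) (m:Int)).foldl (fun c j =>
      c.set j.toNat (c.getD j.toNat 0 + c.getD (j-(k:Int)).toNat 0)) c).length = c.length ∧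
    ∀ j : Nat, ((PySem.List.pyRange (k:Int) (m:Int)).foldl (fun c j =>
      c.set j.toNat (c.getD j.toNat 0 + c.getD (j-(k:Int)).toNat 0)) c).getD j 0
      = if j < m ∧ j < c.length then G k (fun i => c.getD i 0) j else c.getD j 0 := by
  induction m, hkm using Nat.le_induction with
  | base =>
    have hnil : PySem.List.pyRange (k:Int) (k:Int) = [] := by
      simp [PySem.List.pyRange]
    rw [hnil]
    refine ⟨by simp, fun j => ?_⟩
    simp only [List.foldl_nil]
    split_ifs with h
    · rw [G_of_lt _ (by omega)]
    · rfl
  | succ m hm ih =>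
    have hcast : ((m+1 : Nat) : Int) = (m : Int) + 1 := by push_cast; ring
    rw [hcast, PySem.List.pyRange_one_succ_right (by exact_mod_cast hm), List.foldl_append]
    obtain ⟨ihlen, ihget⟩ := ih
    set r := (PySem.List.pyRange (k:Int) (m:Int)).foldl (fun c j =>
      c.set j.toNat (c.getD j.toNat 0 + c.getD (j-(k:Int)).toNat 0)) c with hr
    simp only [List.foldl_cons, List.foldl_nil]
    have htn : ((m:Int)).toNat = m := Int.toNat_natCast m
    have htnk : ((m:Int) - (k:Int)).toNat = m - k := by omega
    rw [htn, htnk]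
    by_cases hmlen : m < c.length
    · have hrlen : m < r.length := by omega
      refine ⟨by rw [List.length_set, ihlen], fun j => ?_⟩
      by_cases hj : j = m
      · subst hj
        have hv : (r.set j (r.getD j 0 + r.getD (j-k) 0)).getD j 0
            = r.getD j 0 + r.getD (j-k) 0 := by
          simp [List.getD_eq_getElem?_getD, hrlen]
        rw [hv, ihget j, ihget (j-k)]
        rw [if_neg (by omega), if_pos (by omega), if_pos (by omega)]
        rw [G_of_le _ hk hm]
      · have hv : (r.set m (r.getD m 0 + r.getD (m-k) 0)).getD j 0 = r.getD j 0 := by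
          simp [List.getD_eq_getElem?_getD, List.getElem?_set, (show ¬ m = j by omega)]
        rw [hv, ihget j, if_congr (by omega : (j < m + 1 ∧ j < c.length) ↔ (j < m ∧ j < c.length)) rfl rfl]
    · have hskip : r.set m (r.getD m 0 + r.getD (m-k) 0) = r :=
        List.set_eq_of_length_le (by omega)
      rw [hskip]
      refine ⟨ihlen, fun j => ?_⟩
      rw [ihget j, if_congr (by omega : (j < m + 1 ∧ j < c.length) ↔ (j < m ∧ j < c.length)) rfl rfl]

def goodl (N : Nat) (f : Nat → Int) (c : List Int) : Prop :=
  c.length = N + 1 ∧ ∀ j : Nat, c.getD j 0 = if j ≤ N then f j else 0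

theorem pass_good {N k : Nat} {f : Nat → Int} {c : List Int} (hk : 0 < k) (hkN : k ≤ N + 1)
    (h : goodl N f c) : goodl N (G k f) (passk (N:Int) (k:Int) c) := by
  obtain ⟨hlen, hget⟩ := h
  unfold passk
  have hc : ((N:Int) + 1) = ((N+1 : Nat) : Int) := by push_cast; ring
  rw [hc]
  obtain ⟨plen, pget⟩ := pass_aux k hk c (N+1) hkN
  refine ⟨by rw [plen, hlen], fun j => ?_⟩
  rw [pget j]
  by_cases hj : j ≤ N
  · rw [if_pos (by omega), if_pos hj]
    apply G_congr
    intro m hm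
    rw [hget m, if_pos (by omega)]
  · rw [if_neg (by omega), if_neg hj, hget j, if_neg hj]

theorem good_init (N : Nat) : goodl N d0 ((List.replicate (N+1) (0:Int)).set 0 1) := by
  refine ⟨by simp, fun j => ?_⟩
  by_cases h0 : j = 0
  · subst h0
    simp [List.getD_eq_getElem?_getD, d0]
  · simp [List.getD_eq_getElem?_getD, List.getElem?_set, List.getElem?_replicate, d0, h0,
      (show ¬ (0 = j) by omega)]
    split_ifs <;> simp

theorem good_init' (N : Nat) : goodl N d0 ((1:Int) :: List.replicate N 0) := by
  refine ⟨by simp, fun j => ?_⟩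
  cases j with
  | zero => simp [d0]
  | succ j =>
    simp [List.getD_eq_getElem?_getD, List.getElem?_replicate, d0]
    split_ifs <;> simp

theorem chainA (N : Nat) : ∀ K, K ≤ N →
    goodl N (A2 K) ((PySem.List.pyRange 1 ((K:Int)+1)).foldl
      (fun c k => passk (N:Int) k (passk (N:Int) k c)) ((List.replicate (N+1) (0:Int)).set 0 1)) := by
  intro K
  induction K with
  | zero =>
    intro _
    have hnil : PySem.List.pyRange 1 (((0:Nat):Int)+1) = [] := by simp [PySem.List.pyRange]
    rw [hnil]
    exact good_init N
  | succ K ih =>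
    intro hKN
    have hsucc : ((K+1 : Nat) : Int) + 1 = ((K:Int) + 1) + 1 := by push_cast; ring
    rw [hsucc, PySem.List.pyRange_one_succ_right (by omega), List.foldl_append]
    simp only [List.foldl_cons, List.foldl_nil]
    have hcast : (K:Int) + 1 = ((K+1 : Nat) : Int) := by push_cast; ring
    rw [hcast]
    exact pass_good (by omega) (by omega) (pass_good (by omega) (by omega) (ih (by omega)))

theorem chainB (N : Nat) : ∀ K, K ≤ N →
    goodl N (P1 K) ((PySem.List.pyRange 1 ((K:Int)+1)).foldl
      (fun c k => passk (N:Int) k c) ((1:Int) :: List.replicate N 0)) := by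
  intro K
  induction K with
  | zero =>
    intro _
    have hnil : PySem.List.pyRange 1 (((0:Nat):Int)+1) = [] := by simp [PySem.List.pyRange]
    rw [hnil]
    exact good_init' N
  | succ K ih =>
    intro hKN
    have hsucc : ((K+1 : Nat) : Int) + 1 = ((K:Int) + 1) + 1 := by push_cast; ring
    rw [hsucc, PySem.List.pyRange_one_succ_right (by omega), List.foldl_append]
    simp only [List.foldl_cons, List.foldl_nil]
    have hcast : (K:Int) + 1 = ((K+1 : Nat) : Int) := by push_cast; ring
    rw [hcast]
    exact pass_good (by omega) (by omega) (ih (by omega))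

theorem main_eq (N : Nat) : bicoloured_from_product ((N : Nat) : Int) = bicoloured_from_product_alt ((N : Nat) : Int) := by
  unfold bicoloured_from_product bicoloured_from_product_alt
  have htn : (((N:Int))+1).toNat = N + 1 := by omega
  rw [htn, Int.toNat_natCast]
  obtain ⟨alen, aget⟩ := chainA N N le_rfl
  obtain ⟨blen, bget⟩ := chainB N N le_rfl
  set LA := (PySem.List.pyRange 1 ((N:Int)+1)).foldl
    (fun c k => passk (N:Int) k (passk (N:Int) k c)) ((List.replicate (N+1) (0:Int)).set 0 1) with hLA
  set p := (PySem.List.pyRange 1 ((N:Int)+1)).foldl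
    (fun c k => passk (N:Int) k c) ((1:Int) :: List.replicate N 0) with hp
  have hrange : PySem.List.pyRange 0 ((N:Int)+1) = (List.range (N+1)).map (fun k : Nat => (k:Int)) := by
    rw [show ((N:Int)+1) = ((N+1 : Nat) : Int) by push_cast; ring, PySem.List.pyRange_zero_natCast]
  rw [hrange, List.map_map]
  apply List.ext_getElem
  · simp [alen]
  · intro j hj hj'
    have hjN : j < N + 1 := by rwa [alen] at hj
    simp only [List.getElem_map, List.getElem_range, Function.comp_apply]
    rw [← hp, PySem.List.foldl_add,
      show ((j:Int)+1) = ((j+1 : Nat) : Int) by push_cast; ring,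
      PySem.List.pyRange_zero_natCast, List.map_map, zero_add]
    have hA : LA[j] = LA.getD j 0 := (List.getD_eq_getElem LA 0 hj).symm
    rw [hA, aget j, if_pos (by omega), A2_eq_cnv]
    have hc : cnv (P1 N) (P1 N) j = ((List.range (j+1)).map (fun i => P1 N i * P1 N (j-i))).sum := rfl
    rw [hc]
    congr 1
    apply List.map_congr_left
    intro i hi
    simp only [List.mem_range] at hi
    simp only [Function.comp_apply]
    rw [Int.toNat_natCast, (show ((j:Int) - (i:Int)).toNat = j - i by omega),
      bget i, bget (j-i), if_pos (by omega), if_pos (by omega)]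

-- ===== VERDICT (by name: the statement is the Claim_ definition above) =====
theorem bicoloured_from_product_spec : Claim_equal_bicoloured_from_product := by
  intro nmax _ hpre
  unfold Pre_bicoloured_from_product at hpre
  unfold Spec_bicoloured_from_product
  have h : nmax = ((nmax.toNat : Nat) : Int) := (Int.toNat_of_nonneg hpre).symm
  rw [h]
  exact main_eq nmax.toNat

@[simp] theorem bicoloured_from_product_raises : Claim_raises_bicoloured_from_product := by
  unfold Claim_raises_bicoloured_from_product
  exact ⟨by
    intro nmax _ hr hp
    unfold Raises_bicoloured_from_product at hr
    unfold Pre_bicoloured_from_product at hp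
    omega, by decide⟩
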